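-- pv_equiv track=rewrite | github.com/joaorgoulart/line_encoding | receiver/server.py | b8zs_decode
-- ===== SOURCE A (Python) =====
-- def b8zs_decode(b8zs_string):
--     ami_string = []
--
--     # Definir o padrão de decodificação B8ZS
--     decode_pattern = {
--         '000+-0-+': '00000000',
--         '000-+0+-': '00000000'
--     }
--
--     i = 0
--     while i < len(b8zs_string):
--         if b8zs_string[i:i+8] in decode_pattern.keys():
--             # Se encontrar um padrão de substituição B8ZS, decodificar
--             for key, value in decode_pattern.items():
--                 if b8zs_string[i:i+8] == key:
--                     ami_string.append(value)
--             i += 8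
--         else:
--             ami_string.append(b8zs_string[i])
--             i += 1
--
--     return ''.join(ami_string)
-- ===== SOURCE B (Python) =====
-- def b8zs_decode(b8zs_string):
--     # Jump between pattern occurrences with str.find and copy whole chunks,
--     # instead of A's char-by-char sliding-window scan.
--     s = b8zs_string
--     out = []
--     while True:
--         j1 = s.find('000+-0-+')
--         j2 = s.find('000-+0+-')
--         if j1 == -1:
--             m = j2
--         elif j2 == -1:
--             m = j1
--         else:
--             m = min(j1, j2)
--         if m == -1:
--             out.append(s)
--             return ''.join(out)
--         out.append(s[:m])
--         out.append('00000000')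
--         s = s[m + 8:]
-- ===== Notes on version B (the rewrite author's own statement) =====
-- stated objective: faster
-- what changed: Replaces A's index-maintaining sliding-window scan (slice s[i:i+8] tested against a dict at every position, with an inner loop over dict items) by a find-and-jump scan: str.find locates the next occurrence of either B8ZS pattern, the untouched chunk is copied wholesale, and the loop restarts on the suffix after the match.
import Mathlib
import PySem

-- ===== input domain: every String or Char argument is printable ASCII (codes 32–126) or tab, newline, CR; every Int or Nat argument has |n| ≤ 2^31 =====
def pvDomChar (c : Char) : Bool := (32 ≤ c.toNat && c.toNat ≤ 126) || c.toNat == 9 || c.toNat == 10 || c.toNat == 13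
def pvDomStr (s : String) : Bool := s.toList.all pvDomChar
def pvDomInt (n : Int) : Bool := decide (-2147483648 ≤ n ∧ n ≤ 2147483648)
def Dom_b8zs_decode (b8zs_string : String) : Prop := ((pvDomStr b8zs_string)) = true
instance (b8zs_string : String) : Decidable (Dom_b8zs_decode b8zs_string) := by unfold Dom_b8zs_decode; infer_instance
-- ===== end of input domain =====

-- B replaces A's per-character sliding-window scan by a find-and-jump scan that copies untouched chunks wholesale (same asymptotics, measured faster in Python in a timing run).

-- ===== PORT A =====
-- the decode_pattern dict, as an association list in insertion order
def b8zs_decode_pattern : List (List Char × List Char) :=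
  [("000+-0-+".toList, "00000000".toList), ("000-+0+-".toList, "00000000".toList)]

-- the while loop: i is the index, acc is the list ami_string of appended pieces
def b8zs_decode_loopA (s : List Char) (i : Nat) (acc : List (List Char)) : List (List Char) :=
  if h : i < s.length then
    if (b8zs_decode_pattern.map Prod.fst).contains
        (PySem.List.slice s (some (i : Int)) (some ((i : Int) + 8))) then
      -- for key, value in decode_pattern.items(): if s[i:i+8] == key: ami_string.append(value)
      b8zs_decode_loopA s (i + 8)
        (acc ++ (b8zs_decode_pattern.foldl
          (fun a kv => if PySem.List.slice s (some (i : Int)) (some ((i : Int) + 8)) = kv.1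
                       then a ++ [kv.2] else a) []))
    else
      b8zs_decode_loopA s (i + 1) (acc ++ [[s[i]]])
  else acc
termination_by s.length - i

def b8zs_decode (b8zs_string : String) : String :=
  String.ofList (PySem.Chars.join [] (b8zs_decode_loopA b8zs_string.toList 0 []))

-- ===== PORT B =====
-- termination helper used by the port's decreasing_by (a match at m needs 8 chars from position m on)
theorem b8zs_decode_find_lt (s p : List Char) (hp : p.length = 8)
    (h : 0 ≤ PySem.Chars.find s p) :
    s.length - ((PySem.Chars.find s p).toNat + 8) < s.length := by
  have hs := (PySem.Chars.find_spec (s := s) (sub := p) h).1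
  have := hs.length_le
  simp only [List.length_drop, hp] at this
  omega

def b8zs_decode_altLoop (s : List Char) (out : List (List Char)) : List (List Char) :=
  let j1 := PySem.Chars.find s "000+-0-+".toList
  let j2 := PySem.Chars.find s "000-+0+-".toList
  let m := if j1 = -1 then j2 else if j2 = -1 then j1 else min j1 j2
  if hm : m = -1 then out ++ [s]
  else
    b8zs_decode_altLoop (PySem.List.slice s (some (m + 8)) none)
      (out ++ [PySem.List.slice s none (some m), "00000000".toList])
termination_by s.length
decreasing_by
  have b1 := PySem.Chars.neg_one_le_find s "000+-0-+".toList
  have b2 := PySem.Chars.neg_one_le_find s "000-+0+-".toList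
  have hm0 : 0 ≤ m := by
    simp only [m, j1, j2] at hm ⊢
    split_ifs at hm ⊢ <;> omega
  have hcase : (m = j1 ∧ 0 ≤ j1) ∨ (m = j2 ∧ 0 ≤ j2) := by
    simp only [m, j1, j2] at hm hm0 ⊢
    split_ifs at hm hm0 ⊢ <;> simp_all <;> omega
  have hlt : s.length - (m.toNat + 8) < s.length := by
    rcases hcase with ⟨he, hge⟩ | ⟨he, hge⟩ <;> rw [he] <;>
      exact b8zs_decode_find_lt s _ (by decide) hge
  show (PySem.List.slice s (some (m + 8)) none).length < s.length
  rw [PySem.List.slice_from s (a := m + 8) (by omega)]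
  simp only [List.length_drop]
  omega

def b8zs_decode_alt (b8zs_string : String) : String :=
  String.ofList (PySem.Chars.join [] (b8zs_decode_altLoop b8zs_string.toList []))

-- ===== PRECONDITION & SPEC =====
def Spec_b8zs_decode (b8zs_string : String) (out : String) : Prop := out = b8zs_decode_alt b8zs_string
instance (b8zs_string : String) (out : String) : Decidable (Spec_b8zs_decode b8zs_string out) := by unfold Spec_b8zs_decode; infer_instance

-- ===== CLAIM (what is proved, stated in full; the proofs are below) =====
def Claim_equal_b8zs_decode : Prop := ∀ (b8zs_string : String), Dom_b8zs_decode b8zs_string → Spec_b8zs_decode b8zs_string (b8zs_decode b8zs_string)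

-- ===== LEMMAS AND PROOFS =====

-- the two B8ZS patterns and the all-zero replacement, as proof-side abbreviations
def pvP1 : List Char := "000+-0-+".toList
def pvP2 : List Char := "000-+0+-".toList
def pvZ8 : List Char := "00000000".toList

-- reference scan: what both loops compute, one suffix at a time
def pvRef : List Char → List Char
  | [] => []
  | c :: cs =>
    if (c :: cs).take 8 = pvP1 ∨ (c :: cs).take 8 = pvP2 then
      pvZ8 ++ pvRef ((c :: cs).drop 8)
    else
      c :: pvRef cs
termination_by s => s.length
decreasing_by all_goals simp

theorem pv_join_flatten (l : List (List Char)) : PySem.Chars.join [] l = l.flatten := by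
  induction l with
  | nil => simp [PySem.Chars.join_nil]
  | cons a t ih =>
    cases t with
    | nil => simp [PySem.Chars.join_singleton]
    | cons b u => simp only [PySem.Chars.join_cons_cons] at ih ⊢; simp [ih]

theorem pv_take8_iff_prefix (s p : List Char) (hp : p.length = 8) :
    s.take 8 = p ↔ p <+: s := by
  rw [List.prefix_iff_eq_take, hp]
  exact eq_comm

theorem pv_slice8 (s : List Char) (i : Nat) :
    PySem.List.slice s (some (i : Int)) (some ((i : Int) + 8)) = (s.drop i).take 8 := by
  have : ((i : Int) + 8) = ((i + 8 : Nat) : Int) := by push_cast; ring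
  rw [this, PySem.List.slice_natCast]
  congr 1
  omega

theorem pv_loopA_eq (s : List Char) (i : Nat) (acc : List (List Char)) :
    (b8zs_decode_loopA s i acc).flatten = acc.flatten ++ pvRef (s.drop i) := by
  induction i, acc using b8zs_decode_loopA.induct s with
  | case1 i acc h hpat ih =>
    rw [b8zs_decode_loopA]
    simp only [h, dite_true, hpat, if_true]
    simp only [dite_eq_ite] at ih
    rw [ih]
    have hw : (s.drop i).take 8 = pvP1 ∨ (s.drop i).take 8 = pvP2 := by
      simpa [b8zs_decode_pattern, pv_slice8, pvP1, pvP2] using hpat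
    have hfold : (b8zs_decode_pattern.foldl
        (fun a kv => if PySem.List.slice s (some (i : Int)) (some ((i : Int) + 8)) = kv.1
                     then a ++ [kv.2] else a) ([] : List (List Char))) = [pvZ8] := by
      rcases hw with hw | hw <;>
        simp [b8zs_decode_pattern, pv_slice8, hw, pvP1, pvP2, pvZ8]
    rw [hfold]
    have hcons : s.drop i = s[i] :: s.drop (i + 1) := List.drop_eq_getElem_cons h
    rw [hcons, pvRef]
    rw [if_pos (by rw [← hcons]; exact hw)]
    simp [List.drop_drop]
  | case2 i acc h hpat ih =>
    rw [b8zs_decode_loopA]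
    rw [dif_pos h, if_neg hpat]
    rw [ih]
    have hw : ¬ ((s.drop i).take 8 = pvP1 ∨ (s.drop i).take 8 = pvP2) := by
      simp only [b8zs_decode_pattern, pv_slice8, pvP1, pvP2] at hpat ⊢
      simpa using hpat
    have hcons : s.drop i = s[i] :: s.drop (i + 1) := List.drop_eq_getElem_cons h
    rw [hcons, pvRef]
    rw [if_neg (by rw [← hcons]; exact hw)]
    simp
  | case3 i acc h =>
    rw [b8zs_decode_loopA]
    simp only [h, dite_false]
    rw [List.drop_of_length_le (by omega)]
    simp [pvRef]

-- pvRef copies everything when no pattern occurs anywhere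
theorem pv_ref_copy (s : List Char)
    (h : ∀ j, ¬ pvP1 <+: s.drop j ∧ ¬ pvP2 <+: s.drop j) : pvRef s = s := by
  induction s using pvRef.induct with
  | case1 => simp [pvRef]
  | case2 c cs hc ih =>
    exfalso
    rcases hc with hc | hc
    · exact (h 0).1 (by simpa using (pv_take8_iff_prefix (c :: cs) pvP1 (by decide)).mp hc)
    · exact (h 0).2 (by simpa using (pv_take8_iff_prefix (c :: cs) pvP2 (by decide)).mp hc)
  | case3 c cs hc ih =>
    rw [pvRef, if_neg hc, ih]
    intro j
    simpa using h (j + 1)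

-- pvRef skips to the first occurrence
theorem pv_ref_skip (N : Nat) (s : List Char)
    (hocc : pvP1 <+: s.drop N ∨ pvP2 <+: s.drop N)
    (hmin : ∀ i < N, ¬ pvP1 <+: s.drop i ∧ ¬ pvP2 <+: s.drop i) :
    pvRef s = s.take N ++ pvZ8 ++ pvRef (s.drop (N + 8)) := by
  induction N generalizing s with
  | zero =>
    simp only [List.drop_zero] at hocc
    cases s with
    | nil =>
      exfalso
      rcases hocc with hocc | hocc <;> simp [List.prefix_nil] at hocc <;>
        exact absurd hocc (by decide)
    | cons c cs =>
      rw [pvRef, if_pos ?_]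
      · simp
      · rcases hocc with hocc | hocc
        · exact Or.inl ((pv_take8_iff_prefix (c :: cs) pvP1 (by decide)).mpr hocc)
        · exact Or.inr ((pv_take8_iff_prefix (c :: cs) pvP2 (by decide)).mpr hocc)
  | succ N ih =>
    cases s with
    | nil =>
      exfalso
      rcases hocc with hocc | hocc <;> simp [List.prefix_nil] at hocc <;>
        exact absurd hocc (by decide)
    | cons c cs =>
      have h0 := hmin 0 (by omega)
      simp only [List.drop_zero] at h0
      have hc : ¬ ((c :: cs).take 8 = pvP1 ∨ (c :: cs).take 8 = pvP2) := by
        intro hcc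
        rcases hcc with hcc | hcc
        · exact h0.1 ((pv_take8_iff_prefix (c :: cs) pvP1 (by decide)).mp hcc)
        · exact h0.2 ((pv_take8_iff_prefix (c :: cs) pvP2 (by decide)).mp hcc)
      rw [pvRef, if_neg hc]
      rw [ih cs (by simpa using hocc) (fun i hi => by simpa using hmin (i + 1) (by omega))]
      simp

theorem pv_no_occ (s p : List Char) (h : PySem.Chars.find s p = -1) :
    ∀ j, ¬ p <+: s.drop j := by
  intro j hj
  exact absurd ((PySem.Chars.isIn_iff_infix p s).mp
    ((PySem.Chars.exists_prefix_drop_iff_isIn p s).mp ⟨j, hj⟩))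
    ((PySem.Chars.find_eq_neg_one_iff s p).mp h)

theorem pv_m_spec (s : List Char) (m : Int)
    (hdef : m = if PySem.Chars.find s pvP1 = -1 then PySem.Chars.find s pvP2
            else if PySem.Chars.find s pvP2 = -1 then PySem.Chars.find s pvP1
            else min (PySem.Chars.find s pvP1) (PySem.Chars.find s pvP2))
    (hm : m ≠ -1) :
    0 ≤ m ∧ (pvP1 <+: s.drop m.toNat ∨ pvP2 <+: s.drop m.toNat) ∧
      ∀ i < m.toNat, ¬ pvP1 <+: s.drop i ∧ ¬ pvP2 <+: s.drop i := by
  have ha1 := PySem.Chars.neg_one_le_find s pvP1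
  have hb1 := PySem.Chars.neg_one_le_find s pvP2
  by_cases hA : PySem.Chars.find s pvP1 = -1
  · rw [hdef, if_pos hA] at *
    have hb0 : 0 ≤ PySem.Chars.find s pvP2 := by omega
    have hsb := PySem.Chars.find_spec (s := s) (sub := pvP2) hb0
    exact ⟨hb0, Or.inr hsb.1,
      fun i hi => ⟨pv_no_occ s pvP1 hA i, hsb.2 i hi⟩⟩
  · by_cases hB : PySem.Chars.find s pvP2 = -1
    · rw [hdef, if_neg hA, if_pos hB] at *
      have ha0 : 0 ≤ PySem.Chars.find s pvP1 := by omega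
      have hsa := PySem.Chars.find_spec (s := s) (sub := pvP1) ha0
      exact ⟨ha0, Or.inl hsa.1,
        fun i hi => ⟨hsa.2 i hi, pv_no_occ s pvP2 hB i⟩⟩
    · have ha0 : 0 ≤ PySem.Chars.find s pvP1 := by omega
      have hb0 : 0 ≤ PySem.Chars.find s pvP2 := by omega
      have hsa := PySem.Chars.find_spec (s := s) (sub := pvP1) ha0
      have hsb := PySem.Chars.find_spec (s := s) (sub := pvP2) hb0
      rw [hdef, if_neg hA, if_neg hB] at *
      rcases le_total (PySem.Chars.find s pvP1) (PySem.Chars.find s pvP2) with hab | hab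
      · rw [min_eq_left hab] at *
        exact ⟨ha0, Or.inl hsa.1,
          fun i hi => ⟨hsa.2 i hi, hsb.2 i (by omega)⟩⟩
      · rw [min_eq_right hab] at *
        exact ⟨hb0, Or.inr hsb.1,
          fun i hi => ⟨hsa.2 i (by omega), hsb.2 i hi⟩⟩

theorem pv_altLoop_eq (s : List Char) (out : List (List Char)) :
    (b8zs_decode_altLoop s out).flatten = out.flatten ++ pvRef s := by
  induction s, out using b8zs_decode_altLoop.induct with
  | case1 s out j1 j2 m hm =>
    rw [b8zs_decode_altLoop]
    simp only [m, j1, j2, dite_eq_ite] at hm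
    rw [dif_pos hm]
    have hj : PySem.Chars.find s pvP1 = -1 ∧ PySem.Chars.find s pvP2 = -1 := by
      have ha1 := PySem.Chars.neg_one_le_find s pvP1
      have hb1 := PySem.Chars.neg_one_le_find s pvP2
      simp only [pvP1, pvP2]
      split_ifs at hm with h1 h2
      · exact ⟨h1, hm⟩
      · exact absurd hm h1
      · rcases le_total (PySem.Chars.find s "000+-0-+".toList) (PySem.Chars.find s "000-+0+-".toList) with hab | hab
        · rw [min_eq_left hab] at hm; exact absurd hm h1
        · rw [min_eq_right hab] at hm; exact absurd hm h2
    rw [pv_ref_copy s (fun j => ⟨pv_no_occ s pvP1 hj.1 j, pv_no_occ s pvP2 hj.2 j⟩)]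
    simp
  | case2 s out j1 j2 m hm ih =>
    rw [b8zs_decode_altLoop]
    simp only [m, j1, j2, dite_eq_ite] at hm ih
    rw [dif_neg hm]
    rw [ih]
    have hspec := pv_m_spec s _ rfl hm
    simp only [pvP1, pvP2] at hspec
    obtain ⟨hm0, hocc, hmin⟩ := hspec
    rw [pv_ref_skip _ s hocc hmin]
    rw [PySem.List.slice_from s (a := _ + 8) (by omega),
        PySem.List.slice_to s (b := _) hm0]
    have h8 : ((if PySem.Chars.find s "000+-0-+".toList = -1 then PySem.Chars.find s "000-+0+-".toList
            else if PySem.Chars.find s "000-+0+-".toList = -1 then PySem.Chars.find s "000+-0-+".toList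
            else min (PySem.Chars.find s "000+-0-+".toList) (PySem.Chars.find s "000-+0+-".toList)) + 8).toNat
        = (if PySem.Chars.find s "000+-0-+".toList = -1 then PySem.Chars.find s "000-+0+-".toList
            else if PySem.Chars.find s "000-+0+-".toList = -1 then PySem.Chars.find s "000+-0-+".toList
            else min (PySem.Chars.find s "000+-0-+".toList) (PySem.Chars.find s "000-+0+-".toList)).toNat + 8 := by
      omega
    rw [h8]
    simp [pvZ8]

-- ===== VERDICT (by name: the statement is the Claim_ definition above) =====
theorem b8zs_decode_spec : Claim_equal_b8zs_decode := by
  intro s _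
  show _ = _
  unfold b8zs_decode b8zs_decode_alt
  rw [pv_join_flatten, pv_join_flatten, pv_loopA_eq, pv_altLoop_eq]
  simp
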